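-- pv_equiv track=rewrite | github.com/williamscommajason/EMD-LPC | rice_decode.py | rice_dict
-- ===== SOURCE A (Python) =====
-- def rice_dict(k,end):
--
--     rice_dictionary = dict()
--     ints = tuple(range(end+1))
--
--     for x in ints:
--         q = x / (1 << k)
--         q = int(q)
--         bString = ''
--         for i in range(q):
--             bString = bString + '1'
--         bString = bString + '0'
--         for i in range(k-1, -1, -1):
--             bString = bString + str((x >> i) & 1)
--
--         rice_dictionary[bString] = x
--
--     return rice_dictionary
-- ===== SOURCE B (Python) =====
-- def rice_dict(k, end):
--     # Quotient-major enumeration of Rice codewords: no per-x division,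
--     # unary prefix computed once per quotient block.
--     rice_dictionary = {}
--     size = 1 << k
--     q = 0
--     while q * size <= end:
--         prefix = '1' * q + '0'
--         for r in range(size):
--             x = q * size + r
--             if x > end:
--                 break
--             key = prefix + ''.join(str((r >> i) & 1) for i in range(k - 1, -1, -1))
--             rice_dictionary[key] = x
--         q += 1
--     return rice_dictionary
-- ===== Notes on version B (the rewrite author's own statement) =====
-- stated objective: alternative
-- what changed: B enumerates Rice codewords quotient-major (a while loop over quotients q building the unary prefix '1'*q once per block, an inner loop over the 2^k remainders) instead of A's per-x float division and per-character unary loop; same entries in the same insertion order.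
-- outside the precondition, e.g. on rice_dict(-1, -1): A returns {}, B raises ValueError
import Mathlib
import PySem

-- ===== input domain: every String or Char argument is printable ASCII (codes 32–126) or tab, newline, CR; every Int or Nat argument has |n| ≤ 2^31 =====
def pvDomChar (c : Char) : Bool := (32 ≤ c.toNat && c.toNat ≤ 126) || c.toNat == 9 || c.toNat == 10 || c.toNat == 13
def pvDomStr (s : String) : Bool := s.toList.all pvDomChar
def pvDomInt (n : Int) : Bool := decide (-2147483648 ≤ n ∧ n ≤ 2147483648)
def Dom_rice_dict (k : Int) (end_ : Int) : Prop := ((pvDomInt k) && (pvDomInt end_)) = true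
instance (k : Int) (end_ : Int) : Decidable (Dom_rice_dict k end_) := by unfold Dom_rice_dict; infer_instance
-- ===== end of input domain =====

-- B enumerates the Rice codewords quotient-major (unary prefix built once per quotient
-- block, remainder bits from r) instead of dividing every x; equivalence of return values.

-- ===== PORT A =====
-- q = int(x / (1 << k)) is ported as floor division: on the admitted domain 0 ≤ x ≤ 2^31 < 2^53,
-- CPython's float true division of x by 2^k is exact and int() truncates the exact value, = floor.
def rice_dict (k : Int) (end_ : Int) : List (String × Int) :=
  ((PySem.List.pyRange 0 (end_ + 1) 1).foldl (fun d x =>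
      let q := PySem.Int.floordiv x ((1 : Int) <<< k.toNat)
      let b := ((PySem.List.pyRange 0 q 1).foldl (fun s _ => s ++ "1") "") ++ "0"
      let b := (PySem.List.pyRange (k - 1) (-1) (-1)).foldl
        (fun s i => s ++ PySem.Int.toStr (PySem.Int.band (x >>> i.toNat) 1)) b
      d.insert b x)
    PySem.Dict.empty).items

-- ===== PORT B =====
-- '1' * q  (q ≥ 0 at every call site)
def pyStrMulOne (n : Nat) : String := String.ofList (List.replicate n '1')

-- ''.join(str((r >> i) & 1) for i in range(k - 1, -1, -1))
def riceBitsB (k r : Int) : String :=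
  PySem.Str.join "" ((PySem.List.pyRange (k - 1) (-1) (-1)).map
    (fun i => PySem.Int.toStr (PySem.Int.band (r >>> i.toNat) 1)))

-- for r in range(size): …  with the 'if x > end: break' early exit
def riceInnerB (k end_ q size : Int) (pre : String)
    (d : PySem.Dict String Int) (r : Int) : PySem.Dict String Int :=
  if _h : r < size then
    let x := q * size + r
    if end_ < x then d
    else riceInnerB k end_ q size pre (d.insert (pre ++ riceBitsB k r) x) (r + 1)
  else d
termination_by (size - r).toNat
decreasing_by omega

-- while q * size <= end: …  (size = 1 << k = 2^k)
def riceOuterB (k end_ : Int) (q : Int) (d : PySem.Dict String Int) : PySem.Dict String Int :=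
  if _h : q * (2 ^ k.toNat : Int) ≤ end_ then
    riceOuterB k end_ (q + 1)
      (riceInnerB k end_ q (2 ^ k.toNat) (pyStrMulOne q.toNat ++ "0") d 0)
  else d
termination_by (end_ + 1 - q * 2 ^ k.toNat).toNat
decreasing_by
  have hs : (0 : Int) < 2 ^ k.toNat := pow_pos (by norm_num) _
  have he : (q + 1) * (2 ^ k.toNat : Int) = q * 2 ^ k.toNat + 2 ^ k.toNat := by ring
  omega

def rice_dict_alt (k : Int) (end_ : Int) : List (String × Int) :=
  (riceOuterB k end_ 0 PySem.Dict.empty).items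

-- ===== PRECONDITION & SPEC =====
-- Pre_ excludes k < 0: there Python's 1 << k raises ValueError in B (and in A whenever end >= 0);
-- for end < 0 A happens to return {} only because its empty loop never reaches the shift, while B
-- computes the block size 1 << k up front and raises.
def Pre_rice_dict (k : Int) (end_ : Int) : Prop := 0 ≤ k
instance (k : Int) (end_ : Int) : Decidable (Pre_rice_dict k end_) := by unfold Pre_rice_dict; infer_instance
def pvWitness_rice_dict : Int × Int := (2, 5)

def Spec_rice_dict (k : Int) (end_ : Int) (out : List (String × Int)) : Prop := out = rice_dict_alt k end_
instance (k : Int) (end_ : Int) (out : List (String × Int)) : Decidable (Spec_rice_dict k end_ out) := by unfold Spec_rice_dict; infer_instance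

-- ===== CLAIM (what is proved, stated in full; the proofs are below) =====
def Claim_equal_rice_dict : Prop := ∀ (k : Int) (end_ : Int), Dom_rice_dict k end_ → Pre_rice_dict k end_ → Spec_rice_dict k end_ (rice_dict k end_)

-- ===== LEMMAS AND PROOFS =====

-- A's per-element fold body, named for the proofs.
def insA (k : Int) (d : PySem.Dict String Int) (x : Int) : PySem.Dict String Int :=
  let q := PySem.Int.floordiv x ((1 : Int) <<< k.toNat)
  let b := ((PySem.List.pyRange 0 q 1).foldl (fun s _ => s ++ "1") "") ++ "0"
  let b := (PySem.List.pyRange (k - 1) (-1) (-1)).foldl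
    (fun s i => s ++ PySem.Int.toStr (PySem.Int.band (x >>> i.toNat) 1)) b
  d.insert b x

lemma rice_dict_eq_foldl (k end_ : Int) :
    rice_dict k end_ = ((PySem.List.pyRange 0 (end_ + 1) 1).foldl (insA k) PySem.Dict.empty).items := rfl

lemma one_shiftLeft_int (n : Nat) : (1 : Int) <<< n = 2 ^ n := by
  have := Int.shiftLeft_eq (1 : Int) n; simp [this]

lemma fold_ones (l : List Int) (s : String) :
    (l.foldl (fun a _ => a ++ "1") s).toList = s.toList ++ List.replicate l.length '1' := by
  induction l generalizing s with
  | nil => simp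
  | cons h t ih =>
      simp [List.foldl_cons, ih, List.replicate_succ]

lemma fold_append (l : List Int) (f : Int → String) (s : String) :
    (l.foldl (fun a i => a ++ f i) s).toList
      = s.toList ++ (l.map (fun i => (f i).toList)).flatten := by
  induction l generalizing s with
  | nil => simp
  | cons h t ih => simp [List.foldl_cons, ih]

lemma chars_join_empty (css : List (List Char)) :
    PySem.Chars.join [] css = css.flatten := by
  induction css with
  | nil => simp [PySem.Chars.join_nil]
  | cons h t ih =>
      cases t with
      | nil => simp [PySem.Chars.join_singleton]
      | cons h2 t2 => rw [PySem.Chars.join_cons_cons]; simp_all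

lemma join_empty (parts : List String) :
    (PySem.Str.join "" parts).toList = (parts.map String.toList).flatten := by
  rw [PySem.Str.toList_join]
  have : ("" : String).toList = [] := rfl
  rw [this, chars_join_empty]

lemma shiftRight_natCast (m n : Nat) : ((m : Int) >>> ((n : Nat) : Int)) = ((m >>> n : Nat) : Int) := by
  simp [Int.shiftRight_eq, Int.natCast_shiftRight]

-- low bits below k of q*2^k + r equal those of r
lemma bits_eq (k i q r : Int) (h0 : 0 ≤ i) (hi : i < k) (hq : 0 ≤ q) (hr : 0 ≤ r) :
    PySem.Int.band ((q * 2 ^ k.toNat + r) >>> (i.toNat : Int)) 1 = PySem.Int.band (r >>> (i.toNat : Int)) 1 := by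
  obtain ⟨Q, rfl⟩ := Int.eq_ofNat_of_zero_le hq
  obtain ⟨R, rfl⟩ := Int.eq_ofNat_of_zero_le hr
  have hik : i.toNat < k.toNat := by omega
  generalize k.toNat = kk at hik
  generalize i.toNat = ii at hik
  have hcast : (Q : Int) * 2 ^ kk + R = ((Q * 2 ^ kk + R : Nat) : Int) := by push_cast; ring
  rw [hcast, shiftRight_natCast, shiftRight_natCast]
  have b1 : (1 : Int) = ((1 : Nat) : Int) := rfl
  rw [b1, PySem.Int.band_natCast, PySem.Int.band_natCast]
  congr 1
  have h1 : (Q * 2 ^ kk + R) >>> ii = R >>> ii + Q * 2 ^ (kk - ii - 1) * 2 := by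
    rw [Nat.shiftRight_eq_div_pow, Nat.shiftRight_eq_div_pow]
    have : Q * 2 ^ kk = Q * 2 ^ (kk - ii - 1) * 2 * 2 ^ ii := by
      rw [mul_assoc, mul_assoc, ← pow_succ']
      congr 2
      rw [← pow_add]
      congr 1
      omega
    rw [this, Nat.add_comm, Nat.add_mul_div_right _ _ (Nat.two_pow_pos ii)]
  rw [h1, Nat.and_one_is_mod, Nat.and_one_is_mod, Nat.add_mul_mod_self_right]

-- the B-side key equals the key A computes for x = q * 2^k + r
lemma key_eq (k q r : Int) (_hk : 0 ≤ k) (hq : 0 ≤ q) (hr : 0 ≤ r) (hrs : r < 2 ^ k.toNat) :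
    pyStrMulOne q.toNat ++ "0" ++ riceBitsB k r
      = (PySem.List.pyRange (k - 1) (-1) (-1)).foldl
          (fun s i => s ++ PySem.Int.toStr (PySem.Int.band ((q * 2 ^ k.toNat + r) >>> i.toNat) 1))
          ((PySem.List.pyRange 0 (PySem.Int.floordiv (q * 2 ^ k.toNat + r) ((1 : Int) <<< k.toNat)) 1).foldl
            (fun s _ => s ++ "1") "" ++ "0") := by
  have hpow : (0 : Int) < 2 ^ k.toNat := pow_pos (by norm_num) _
  have hq' : PySem.Int.floordiv (q * 2 ^ k.toNat + r) ((1 : Int) <<< k.toNat) = q := by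
    rw [one_shiftLeft_int]
    rw [PySem.Int.floordiv_eq_iff_of_pos hpow]
    have : (q + 1) * (2 ^ k.toNat : Int) = q * 2 ^ k.toNat + 2 ^ k.toNat := by ring
    omega
  rw [hq']
  rw [← String.toList_inj]
  rw [fold_append]
  simp only [String.toList_append]
  rw [fold_ones]
  have hnil : ("" : String).toList = [] := rfl
  rw [hnil]
  simp only [riceBitsB, join_empty, List.map_map, PySem.List.length_pyRange_one,
    pyStrMulOne, String.toList_ofList]
  have hlen : (q - 0).toNat = q.toNat := by omega
  rw [hlen]
  simp only [List.nil_append, List.append_assoc]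
  congr 2
  apply congrArg List.flatten
  apply List.map_congr_left
  intro i hi
  rw [PySem.List.mem_pyRange_neg_one] at hi
  rw [bits_eq k i q r (by omega) (by omega) hq hr]
  rfl

lemma inner_eq (k end_ q : Int) (hk : 0 ≤ k) (hq : 0 ≤ q) :
    ∀ (r : Int) (d : PySem.Dict String Int), 0 ≤ r →
    riceInnerB k end_ q (2 ^ k.toNat) (pyStrMulOne q.toNat ++ "0") d r
      = (PySem.List.pyRange (q * 2 ^ k.toNat + r)
          (min ((q + 1) * 2 ^ k.toNat) (end_ + 1)) 1).foldl (insA k) d := by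
  have hsum : (q + 1) * (2 ^ k.toNat : Int) = q * 2 ^ k.toNat + 2 ^ k.toNat := by ring
  suffices H : ∀ (n : Nat) (r : Int) (d : PySem.Dict String Int), 0 ≤ r →
      ((2 ^ k.toNat : Int) - r).toNat = n →
      riceInnerB k end_ q (2 ^ k.toNat) (pyStrMulOne q.toNat ++ "0") d r
        = (PySem.List.pyRange (q * 2 ^ k.toNat + r)
            (min ((q + 1) * 2 ^ k.toNat) (end_ + 1)) 1).foldl (insA k) d by
    intro r d hr
    exact H _ r d hr rfl
  intro n
  induction n with
  | zero =>
      intro r d hr hn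
      have hrs : (2 ^ k.toNat : Int) ≤ r := by omega
      rw [riceInnerB]
      rw [dif_neg (by omega)]
      rw [PySem.List.pyRange_one_eq_nil (by omega)]
      rfl
  | succ n ih =>
      intro r d hr hn
      rw [riceInnerB]
      by_cases hlt : r < (2 ^ k.toNat : Int)
      · rw [dif_pos hlt]
        by_cases hend : end_ < q * 2 ^ k.toNat + r
        · simp only [if_pos hend]
          rw [PySem.List.pyRange_one_eq_nil (le_trans (min_le_right _ _) (by omega))]
          rfl
        · simp only [if_neg hend]
          have hins : insA k d (q * 2 ^ k.toNat + r)
              = d.insert (pyStrMulOne q.toNat ++ "0" ++ riceBitsB k r) (q * 2 ^ k.toNat + r) := by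
            simp only [insA]
            rw [key_eq k q r hk hq hr hlt]
          rw [ih (r + 1) _ (by omega) (by omega)]
          rw [PySem.List.pyRange_one_cons (show q * 2 ^ k.toNat + r < min ((q + 1) * 2 ^ k.toNat) (end_ + 1) from by
            rw [lt_min_iff]; constructor <;> omega)]
          rw [List.foldl_cons]
          have harg : q * 2 ^ k.toNat + (r + 1) = q * 2 ^ k.toNat + r + 1 := by ring
          rw [harg, hins]
      · rw [dif_neg hlt]
        rw [PySem.List.pyRange_one_eq_nil (by omega)]
        rfl

lemma outer_eq (k end_ : Int) (hk : 0 ≤ k) :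
    ∀ (q : Int) (d : PySem.Dict String Int), 0 ≤ q →
    riceOuterB k end_ q d = (PySem.List.pyRange (q * 2 ^ k.toNat) (end_ + 1) 1).foldl (insA k) d := by
  have hpow : (0 : Int) < 2 ^ k.toNat := pow_pos (by norm_num) _
  suffices H : ∀ (n : Nat) (q : Int) (d : PySem.Dict String Int), 0 ≤ q →
      (end_ + 1 - q * 2 ^ k.toNat).toNat ≤ n →
      riceOuterB k end_ q d = (PySem.List.pyRange (q * 2 ^ k.toNat) (end_ + 1) 1).foldl (insA k) d by
    intro q d hq
    exact H _ q d hq le_rfl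
  intro n
  induction n with
  | zero =>
      intro q d hq hn
      have hgt : ¬ (q * (2 ^ k.toNat : Int) ≤ end_) := by omega
      rw [riceOuterB, dif_neg hgt]
      rw [PySem.List.pyRange_one_eq_nil (by omega)]
      rfl
  | succ n ih =>
      intro q d hq hn
      have hsum : (q + 1) * (2 ^ k.toNat : Int) = q * 2 ^ k.toNat + 2 ^ k.toNat := by ring
      rw [riceOuterB]
      by_cases hle : q * (2 ^ k.toNat : Int) ≤ end_
      · rw [dif_pos hle]
        rw [inner_eq k end_ q hk hq 0 d le_rfl]
        rw [ih (q + 1) _ (by omega) (by omega)]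
        rw [add_zero]
        rw [PySem.List.pyRange_one_append (q * 2 ^ k.toNat)
          (min ((q + 1) * 2 ^ k.toNat) (end_ + 1)) (end_ + 1)
          (by rw [le_min_iff]; constructor <;> omega) (min_le_right _ _)]
        rw [List.foldl_append]
        by_cases hm : (q + 1) * (2 ^ k.toNat : Int) ≤ end_ + 1
        · rw [min_eq_left hm]
        · have hm' : end_ + 1 ≤ (q + 1) * (2 ^ k.toNat : Int) := by omega
          rw [min_eq_right hm']
          rw [PySem.List.pyRange_one_eq_nil (le_refl (end_ + 1)),
            PySem.List.pyRange_one_eq_nil hm']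
      · rw [dif_neg hle]
        rw [PySem.List.pyRange_one_eq_nil (by omega)]
        rfl

-- ===== VERDICT (by name: the statement is the Claim_ definition above) =====
theorem rice_dict_spec : Claim_equal_rice_dict := by
  intro k end_ _hdom hpre
  unfold Spec_rice_dict
  rw [rice_dict_eq_foldl, rice_dict_alt, outer_eq k end_ hpre 0 PySem.Dict.empty le_rfl]
  norm_num
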